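-- pv_equiv track=rewrite | github.com/Stranger-dv/hacks_python_2 | hack_10.py | fn_hack_10
-- ===== SOURCE A (Python) =====
-- def fn_hack_10(s):
--     result = s
--     _ls = []
--     for dict in result:
--         for tupla in dict.items():
--             lista = list(tupla)
--             for value in lista:
--                 _ls.append(value)
--
--     longitud = len(_ls) + 1
--
--     new_list = [i for i in range(1, longitud)]
--     impares = [str(i) for i in new_list if i % 2 != 0]
--     pares = [str(i) for i in new_list if i % 2 == 0]
--
--
--     result = []
--
--     i = 0
--     while(i < len(pares)):
--         dict = {}
--         dict[impares[i]] = pares[i]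
--         result.append(dict)
--         i += 1
--     return result
-- ===== SOURCE B (Python) =====
-- def fn_hack_10(s):
--     M = sum(1 for d in s for _ in d.items())
--     return [{str(2 * i + 1): str(2 * i + 2)} for i in range(M)]
-- ===== Notes on version B (the rewrite author's own statement) =====
-- stated objective: simpler
-- what changed: B counts the dict entries once and emits the output with a closed-form comprehension [{str(2i+1): str(2i+2)} for i in range(M)], dropping A's flattened value list, the 1..N range, the odd/even filter lists and the index-driven while loop.
import Mathlib
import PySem

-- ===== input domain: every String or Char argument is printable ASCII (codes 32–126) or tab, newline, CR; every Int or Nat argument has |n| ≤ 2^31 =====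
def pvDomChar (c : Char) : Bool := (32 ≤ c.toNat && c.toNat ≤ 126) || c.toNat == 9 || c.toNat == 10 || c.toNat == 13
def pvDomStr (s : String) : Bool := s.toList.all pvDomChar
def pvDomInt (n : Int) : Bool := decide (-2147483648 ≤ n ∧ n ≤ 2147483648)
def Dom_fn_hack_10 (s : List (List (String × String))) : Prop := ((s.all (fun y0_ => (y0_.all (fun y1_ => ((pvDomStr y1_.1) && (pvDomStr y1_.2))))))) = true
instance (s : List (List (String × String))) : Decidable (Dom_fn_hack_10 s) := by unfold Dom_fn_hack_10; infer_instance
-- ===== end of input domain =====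

-- B replaces A's flatten-filter-zip pipeline by one entry count and a closed-form comprehension (objective: simpler).

-- ===== PORT A =====
-- the while loop: i runs over 0,1,…; impares[i]/pares[i] are in range whenever the loop
-- condition holds (len(impares) = len(pares) there), so pyGetD with a default is exact
def fnHack10While (impares pares : List String) (i : Nat)
    (result : List (List (String × String))) : List (List (String × String)) :=
  if _h : i < pares.length then
    fnHack10While impares pares (i + 1)
      (result ++ [[(PySem.List.pyGetD impares (i : Int) "", PySem.List.pyGetD pares (i : Int) "")]])
  else result
termination_by pares.length - i

def fn_hack_10 (s : List (List (String × String))) : List (List (String × String)) :=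
  let ls : List String :=
    s.foldl (fun acc d => d.foldl (fun a t => (a ++ [t.1]) ++ [t.2]) acc) []
  let longitud : Int := (ls.length : Int) + 1
  let newList : List Int := PySem.List.pyRange 1 longitud 1
  let impares : List String :=
    (newList.filter (fun i => PySem.Int.mod i 2 != 0)).map PySem.Int.toStr
  let pares : List String :=
    (newList.filter (fun i => PySem.Int.mod i 2 == 0)).map PySem.Int.toStr
  fnHack10While impares pares 0 []

-- ===== PORT B =====
def fn_hack_10_alt (s : List (List (String × String))) : List (List (String × String)) :=
  let M : Nat := s.foldl (fun acc d => d.foldl (fun a _ => a + 1) acc) 0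
  (List.range M).map (fun (i : Nat) =>
    [(PySem.Int.toStr (2 * (i : Int) + 1), PySem.Int.toStr (2 * (i : Int) + 2))])

-- ===== PRECONDITION & SPEC =====
def Spec_fn_hack_10 (s : List (List (String × String))) (out : List (List (String × String))) : Prop := out = fn_hack_10_alt s
instance (s : List (List (String × String))) (out : List (List (String × String))) : Decidable (Spec_fn_hack_10 s out) := by unfold Spec_fn_hack_10; infer_instance

-- ===== CLAIM (what is proved, stated in full; the proofs are below) =====
def Claim_equal_fn_hack_10 : Prop := ∀ (s : List (List (String × String))), Dom_fn_hack_10 s → Spec_fn_hack_10 s (fn_hack_10 s)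

-- ===== LEMMAS AND PROOFS =====

-- counting fold with a general accumulator
lemma cnt_inner (d : List (String × String)) (m : Nat) :
    d.foldl (fun a _ => a + 1) m = m + d.length := by
  induction d generalizing m with
  | nil => simp
  | cons x xs ih => rw [List.foldl_cons, ih]; simp; omega

lemma cnt_outer (s : List (List (String × String))) (m : Nat) :
    s.foldl (fun acc d => d.foldl (fun a _ => a + 1) acc) m
      = m + (s.map List.length).sum := by
  induction s generalizing m with
  | nil => simp
  | cons d ds ih => rw [List.foldl_cons, ih, cnt_inner]; simp; omega

-- length of A's flattened list
lemma ls_inner (d : List (String × String)) (acc : List String) :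
    (d.foldl (fun a t => (a ++ [t.1]) ++ [t.2]) acc).length = acc.length + 2 * d.length := by
  induction d generalizing acc with
  | nil => simp
  | cons x xs ih => rw [List.foldl_cons, ih]; simp; omega

lemma ls_outer (s : List (List (String × String))) (acc : List String) :
    (s.foldl (fun acc d => d.foldl (fun a t => (a ++ [t.1]) ++ [t.2]) acc) acc).length
      = acc.length + 2 * (s.map List.length).sum := by
  induction s generalizing acc with
  | nil => simp
  | cons d ds ih => rw [List.foldl_cons, ih, ls_inner]; simp; omega

-- the 1..2n filters in closed form
lemma impares_closed (n : Nat) :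
    ((PySem.List.pyRange 1 (2 * (n : Int) + 1) 1).filter
        (fun i => PySem.Int.mod i 2 != 0)).map PySem.Int.toStr
      = (List.range n).map (fun (k : Nat) => PySem.Int.toStr (2 * (k : Int) + 1)) := by
  induction n with
  | zero => simp [PySem.List.pyRange_one_eq_nil]
  | succ m ih =>
    have h1 : (2 * ((m + 1 : Nat) : Int) + 1) = (2 * (m : Int) + 1) + 1 + 1 := by push_cast; ring
    rw [h1, PySem.List.pyRange_one_succ_right (by omega),
        PySem.List.pyRange_one_succ_right (by omega)]
    have ho : PySem.Int.mod (2 * (m : Int) + 1) 2 ≠ 0 := by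
      rw [Ne, PySem.Int.mod_eq_zero_iff_dvd]; omega
    have he : PySem.Int.mod (2 * (m : Int) + 1 + 1) 2 = 0 := by
      rw [PySem.Int.mod_eq_zero_iff_dvd]; omega
    rw [List.filter_append, List.filter_append, List.map_append, List.map_append, ih,
        List.range_succ, List.map_append]
    simp
    omega

lemma pares_closed (n : Nat) :
    ((PySem.List.pyRange 1 (2 * (n : Int) + 1) 1).filter
        (fun i => PySem.Int.mod i 2 == 0)).map PySem.Int.toStr
      = (List.range n).map (fun (k : Nat) => PySem.Int.toStr (2 * (k : Int) + 2)) := by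
  induction n with
  | zero => simp [PySem.List.pyRange_one_eq_nil]
  | succ m ih =>
    have h1 : (2 * ((m + 1 : Nat) : Int) + 1) = (2 * (m : Int) + 1) + 1 + 1 := by push_cast; ring
    rw [h1, PySem.List.pyRange_one_succ_right (by omega),
        PySem.List.pyRange_one_succ_right (by omega)]
    have ho : PySem.Int.mod (2 * (m : Int) + 1) 2 ≠ 0 := by
      rw [Ne, PySem.Int.mod_eq_zero_iff_dvd]; omega
    have he : PySem.Int.mod (2 * (m : Int) + 1 + 1) 2 = 0 := by
      rw [PySem.Int.mod_eq_zero_iff_dvd]; omega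
    rw [List.filter_append, List.filter_append, List.map_append, List.map_append, ih,
        List.range_succ, List.map_append]
    have h2 : (2 * (m : Int) + 1 + 1) = 2 * (m : Int) + 2 := by ring
    simp [h2]

-- the while loop over two equal-length index maps zips them
lemma while_closed (f g : Nat → String) (n i : Nat) (res : List (List (String × String)))
    (hi : i ≤ n) :
    fnHack10While ((List.range n).map f) ((List.range n).map g) i res
      = res ++ (((List.range n).drop i).map (fun k => [(f k, g k)])) := by
  by_cases h : i < n
  · rw [fnHack10While]
    have hlen : ((List.range n).map g).length = n := by simp
    rw [dif_pos (by simpa [hlen])]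
    have hf : PySem.List.pyGetD ((List.range n).map f) (i : Int) "" = f i := by
      rw [PySem.List.pyGetD_natCast]
      rw [List.getD_eq_getElem?_getD]
      simp [List.getElem?_range h]
    have hg : PySem.List.pyGetD ((List.range n).map g) (i : Int) "" = g i := by
      rw [PySem.List.pyGetD_natCast]
      rw [List.getD_eq_getElem?_getD]
      simp [List.getElem?_range h]
    rw [hf, hg, while_closed f g n (i + 1) _ (by omega)]
    have hdrop : (List.range n).drop i = i :: (List.range n).drop (i + 1) := by
      rw [List.drop_eq_getElem_cons (by simpa)]
      simp
    rw [hdrop]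
    simp
  · have hin : i = n := by omega
    rw [fnHack10While, dif_neg (by simp [hin])]
    simp [hin]
termination_by n - i

-- ===== VERDICT (by name: the statement is the Claim_ definition above) =====
theorem fn_hack_10_spec : Claim_equal_fn_hack_10 := by
  intro s _
  show fn_hack_10 s = fn_hack_10_alt s
  unfold fn_hack_10 fn_hack_10_alt
  set M : Nat := (s.map List.length).sum with hM
  have hcnt : s.foldl (fun acc d => d.foldl (fun a _ => a + 1) acc) 0 = M := by
    simpa using cnt_outer s 0
  have hlen :
      (s.foldl (fun acc d => d.foldl (fun a t => (a ++ [t.1]) ++ [t.2]) acc) []).length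
        = 2 * M := by simpa using ls_outer s []
  simp only [hcnt, hlen]
  have hcast : ((2 * M : Nat) : Int) + 1 = 2 * (M : Int) + 1 := by push_cast; ring
  rw [hcast, impares_closed M, pares_closed M,
      while_closed (fun k => PySem.Int.toStr (2 * (k : Int) + 1))
        (fun k => PySem.Int.toStr (2 * (k : Int) + 2)) M 0 [] (by omega)]
  simp
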